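-- pv_equiv track=rewrite | github.com/alexandraback/datacollection | solutions_2751486_0/Python/ICastro/a.py | nValue
-- ===== SOURCE A (Python) =====
-- def nValue(L1,n):
-- 	cont = 0
-- 	for x in range(len(L1)):
-- 		if(L1[x]!='a')and(L1[x]!='e')and(L1[x]!='i')and(L1[x]!='o')and(L1[x]!='u'):
-- 			cont+=1
-- 			if cont == n:
-- 				return 1
-- 		else:
-- 			cont=0
-- 	return 0
-- ===== SOURCE B (Python) =====
-- def nValue(L1, n):
--     if n <= 0:
--         return 0
--     runs = []
--     cur = 0
--     for s in L1:
--         if s in ('a', 'e', 'i', 'o', 'u'):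
--             runs.append(cur)
--             cur = 0
--         else:
--             cur += 1
--     runs.append(cur)
--     return 1 if any(r >= n for r in runs) else 0
-- ===== Notes on version B (the rewrite author's own statement) =====
-- stated objective: alternative
-- what changed: Replaces A's running-counter with early return by a group-build-then-test decomposition: after an n<=0 guard, collect the lengths of all maximal non-vowel runs and test whether any reaches n.
import Mathlib
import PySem

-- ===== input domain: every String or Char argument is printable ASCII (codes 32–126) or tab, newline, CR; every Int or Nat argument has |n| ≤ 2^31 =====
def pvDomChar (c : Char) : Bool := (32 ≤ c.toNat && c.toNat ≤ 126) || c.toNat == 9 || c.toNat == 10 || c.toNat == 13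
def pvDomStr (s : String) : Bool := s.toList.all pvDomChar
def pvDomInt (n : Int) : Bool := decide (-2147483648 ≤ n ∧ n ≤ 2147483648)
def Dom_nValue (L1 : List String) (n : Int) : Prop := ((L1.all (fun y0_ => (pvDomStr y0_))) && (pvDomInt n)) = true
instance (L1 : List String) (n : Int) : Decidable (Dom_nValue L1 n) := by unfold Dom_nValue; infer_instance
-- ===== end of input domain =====

-- B: group-build-then-test — collect maximal non-vowel run lengths, then test any >= n (same cost as A).
-- ===== PORT A =====
-- A's for-x-in-range(len(L1)) loop over L1[x] with counter cont and early return, as structural recursion over L1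
def nValueLoopA : List String → Int → Int → Int
  | [], _, _ => 0
  | s :: rest, n, cont =>
      if s ≠ "a" ∧ s ≠ "e" ∧ s ≠ "i" ∧ s ≠ "o" ∧ s ≠ "u" then
        (if cont + 1 = n then 1 else nValueLoopA rest n (cont + 1))
      else nValueLoopA rest n 0

def nValue (L1 : List String) (n : Int) : Int := nValueLoopA L1 n 0

-- ===== PORT B =====
-- Source B's loop: accumulate finished run lengths in runs, current run length in cur
def nValueLoopB : List String → List Int → Int → List Int × Int
  | [], runs, cur => (runs, cur)
  | s :: rest, runs, cur =>
      if s = "a" ∨ s = "e" ∨ s = "i" ∨ s = "o" ∨ s = "u" then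
        nValueLoopB rest (runs ++ [cur]) 0
      else nValueLoopB rest runs (cur + 1)

def nValue_alt (L1 : List String) (n : Int) : Int :=
  if n ≤ 0 then 0
  else
    let p := nValueLoopB L1 [] 0
    let runs := p.1 ++ [p.2]
    if runs.any (fun r => decide (n ≤ r)) then 1 else 0

-- ===== PRECONDITION & SPEC =====
def Spec_nValue (L1 : List String) (n : Int) (out : Int) : Prop := out = nValue_alt L1 n
instance (L1 : List String) (n : Int) (out : Int) : Decidable (Spec_nValue L1 n out) := by unfold Spec_nValue; infer_instance

-- ===== CLAIM (what is proved, stated in full; the proofs are below) =====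
def Claim_equal_nValue : Prop := ∀ (L1 : List String) (n : Int), Dom_nValue L1 n → Spec_nValue L1 n (nValue L1 n)

-- ===== LEMMAS AND PROOFS =====

-- maximal non-vowel run length reachable from current counter c (proof-only helper)
def runMax : List String → Int → Int
  | [], c => c
  | s :: rest, c =>
      if s = "a" ∨ s = "e" ∨ s = "i" ∨ s = "o" ∨ s = "u" then
        max c (runMax rest 0)
      else runMax rest (c + 1)

theorem runMax_ge (xs : List String) (c : Int) : c ≤ runMax xs c := by
  induction xs generalizing c with
  | nil => simp [runMax]
  | cons s rest ih =>
      simp only [runMax]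
      split
      · exact le_max_left _ _
      · exact le_trans (by omega) (ih (c + 1))

theorem loopA_eq (xs : List String) (n c : Int) (h : c < n) (hc : 0 ≤ c) :
    nValueLoopA xs n c = if n ≤ runMax xs c then 1 else 0 := by
  induction xs generalizing c with
  | nil => simp only [nValueLoopA, runMax]; omega
  | cons s rest ih =>
      simp only [nValueLoopA, runMax]
      by_cases hv : s = "a" ∨ s = "e" ∨ s = "i" ∨ s = "o" ∨ s = "u"
      · rw [if_neg (by tauto)]
        simp only [if_pos hv]
        rw [ih 0 (by omega) le_rfl]
        rcases le_or_gt n (runMax rest 0) with h2 | h2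
        · rw [if_pos h2, if_pos (le_max_iff.mpr (Or.inr h2))]
        · rw [if_neg (not_le.mpr h2), if_neg (by rw [not_le, max_lt_iff]; exact ⟨h, h2⟩)]
      · rw [if_pos (by tauto)]
        simp only [if_neg hv]
        by_cases he : c + 1 = n
        · rw [if_pos he]
          have := runMax_ge rest (c + 1)
          rw [if_pos (by omega)]
        · rw [if_neg he, ih (c + 1) (by omega) (by omega)]

theorem loopB_any (xs : List String) (rs : List Int) (c n : Int) :
    ((((nValueLoopB xs rs c).1 ++ [(nValueLoopB xs rs c).2]).any (fun r => decide (n ≤ r))) = true)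
      ↔ ((rs.any (fun r => decide (n ≤ r)) = true) ∨ n ≤ runMax xs c) := by
  induction xs generalizing rs c with
  | nil => simp [nValueLoopB, runMax, List.any_append]
  | cons s rest ih =>
      simp only [nValueLoopB, runMax]
      split
      · rw [ih]
        simp [List.any_append]
        exact or_assoc
      · rw [ih]

theorem loopA_nonpos (xs : List String) (n c : Int) (hn : n ≤ 0) (hc : 0 ≤ c) :
    nValueLoopA xs n c = 0 := by
  induction xs generalizing c with
  | nil => simp [nValueLoopA]
  | cons s rest ih =>
      simp only [nValueLoopA]
      split
      · rw [if_neg (by omega), ih (c + 1) (by omega)]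
      · exact ih 0 (by omega)

-- ===== VERDICT (by name: the statement is the Claim_ definition above) =====
theorem nValue_spec : Claim_equal_nValue := by
  intro L1 n _
  unfold Spec_nValue nValue nValue_alt
  by_cases hn : n ≤ 0
  · rw [if_pos hn, loopA_nonpos L1 n 0 hn le_rfl]
  · rw [if_neg hn, loopA_eq L1 n 0 (by omega) le_rfl]
    exact if_congr (((loopB_any L1 [] 0 n).trans (by simp)).symm) rfl rfl
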